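-- pv_equiv track=rewrite | github.com/tsuru7/algorithm-study | AtCoder/ABC239/D.py | solve
-- ===== SOURCE A (Python) =====
-- def solve(a,b,c,d):
--     MAX = b+d
--     MIN = a+c
--     primes = [True]*(MAX+1)
--     primes[0] = False
--     primes[1] = False
--     for i in range(2, MAX+1):
--         x = i
--         if not primes[x]:
--             continue
--         x += i
--         while x <= MAX:
--             primes[x] = False
--             x += i
--     primeonly = [MIN-1] # 番兵
--     for i in range(MIN, MAX+1):
--         if primes[i]:
--             primeonly.append(i)
--     primeonly.append(MAX+1) # 番兵
--     maxdif = 0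
--     for i in range(1, len(primeonly)):
--         maxdif = max(maxdif, primeonly[i]-primeonly[i-1])
--     if maxdif > d-c+1:
--         return 'Takahashi'
--     else:
--         return 'Aoki'
-- ===== SOURCE B (Python) =====
-- def is_prime(n):
--     if n < 2:
--         return False
--     d = 2
--     while d * d <= n:
--         if n % d == 0:
--             return False
--         d += 1
--     return True
--
-- def solve(a, b, c, d):
--     MIN = a + c
--     MAX = b + d
--     prev = MIN - 1
--     maxdif = 0
--     for i in range(MIN, MAX + 1):
--         if is_prime(i):
--             maxdif = max(maxdif, i - prev)
--             prev = i
--     maxdif = max(maxdif, MAX + 1 - prev)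
--     return 'Takahashi' if maxdif > d - c + 1 else 'Aoki'
-- ===== Notes on version B (the rewrite author's own statement) =====
-- stated objective: alternative
-- what changed: Replaces the sieve-then-materialize-prime-list-then-rescan pipeline with a single fused pass over [a+c, b+d] that tests each number by trial division and maintains a running (prev, maxdif) pair, so there is no boolean sieve array and no intermediate list at all.
-- outside the precondition, e.g. on solve(-6, 0, -2, 7): A returns 'Aoki', B returns 'Takahashi'
import Mathlib
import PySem

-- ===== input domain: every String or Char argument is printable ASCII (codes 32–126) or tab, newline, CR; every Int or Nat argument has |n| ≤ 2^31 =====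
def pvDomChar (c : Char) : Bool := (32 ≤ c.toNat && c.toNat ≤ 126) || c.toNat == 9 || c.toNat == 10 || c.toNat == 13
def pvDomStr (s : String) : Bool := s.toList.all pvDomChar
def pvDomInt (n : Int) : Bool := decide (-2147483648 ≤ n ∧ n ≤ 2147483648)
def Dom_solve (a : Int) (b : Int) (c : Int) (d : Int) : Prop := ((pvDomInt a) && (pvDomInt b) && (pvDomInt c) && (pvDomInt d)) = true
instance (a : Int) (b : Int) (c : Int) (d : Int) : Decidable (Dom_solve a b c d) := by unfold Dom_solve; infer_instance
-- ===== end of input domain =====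

-- B replaces A's sieve → prime-list → gap-rescan pipeline by one fused pass with trial-division
-- primality and a running (prev, maxdif) pair (objective: alternative; not claimed faster).

-- ===== PORT A =====
def solve (a : Int) (b : Int) (c : Int) (d : Int) : String :=
  let MAX := b + d
  let MIN := a + c
  let primes0 := PySem.List.pyRepeat [true] (MAX + 1)       -- primes = [True]*(MAX+1)
  let primes1 := PySem.List.pySetD primes0 0 false          -- primes[0] = False
  let primes2 := PySem.List.pySetD primes1 1 false          -- primes[1] = False
  -- for i in range(2, MAX+1): …  (the inner 'x += i' while-loop is range(2*i, MAX+1, i))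
  let primes := (PySem.List.pyRange 2 (MAX + 1) 1).foldl (fun ps i =>
      if !(PySem.List.pyGetD ps i false) then ps
      else (PySem.List.pyRange (i + i) (MAX + 1) i).foldl
             (fun ps2 x => PySem.List.pySetD ps2 x false) ps) primes2
  -- primeonly = [MIN-1]; for i in range(MIN, MAX+1): if primes[i]: primeonly.append(i)
  let primeonly := (PySem.List.pyRange MIN (MAX + 1) 1).foldl (fun acc i =>
      if PySem.List.pyGetD primes i false then acc ++ [i] else acc) [MIN - 1]
  let primeonly := primeonly ++ [MAX + 1]
  -- maxdif = 0; for i in range(1, len(primeonly)): maxdif = max(maxdif, primeonly[i]-primeonly[i-1])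
  let maxdif := (PySem.List.pyRange 1 (PySem.List.len primeonly) 1).foldl (fun m i =>
      max m (PySem.List.pyGetD primeonly i 0 - PySem.List.pyGetD primeonly (i - 1) 0)) 0
  if maxdif > d - c + 1 then "Takahashi" else "Aoki"

-- ===== PORT B =====
-- while d*d <= n: if n % d == 0: return False; d += 1
def isPrimeAux (n : Int) (dv : Int) : Bool :=
  if _h : dv * dv ≤ n then
    if PySem.Int.mod n dv == 0 then false
    else isPrimeAux n (dv + 1)
  else true
termination_by (n + 1 - dv).toNat
decreasing_by
  have hsq : (0:Int) ≤ dv * dv := mul_self_nonneg dv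
  by_cases h0 : dv ≤ 0
  · omega
  · have : dv * 1 ≤ dv * dv := by
      apply mul_le_mul_of_nonneg_left _ (by omega : (0:Int) ≤ dv)
      omega
    omega

def isPrime (n : Int) : Bool := if n < 2 then false else isPrimeAux n 2

def solve_alt (a : Int) (b : Int) (c : Int) (d : Int) : String :=
  let MIN := a + c
  let MAX := b + d
  let s := (PySem.List.pyRange MIN (MAX + 1) 1).foldl
      (fun (s : Int × Int) i => if isPrime i then (i, max s.2 (i - s.1)) else s) (MIN - 1, 0)
  let maxdif := max s.2 (MAX + 1 - s.1)
  if maxdif > d - c + 1 then "Takahashi" else "Aoki"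

-- ===== PRECONDITION & SPEC =====
-- Pre_ excludes (i) inputs where A raises IndexError (b+d < 1: the sieve has fewer than two
-- cells; a+c < -(b+d)-1: a scan index below -len), and (ii) inputs with a+c < 0 — outside the
-- contest's natural domain (positive a,b,c,d) — where A's value comes from Python
-- negative-index wraparound into the sieve.
def Pre_solve (a : Int) (b : Int) (c : Int) (d : Int) : Prop := 1 ≤ b + d ∧ 0 ≤ a + c
instance (a : Int) (b : Int) (c : Int) (d : Int) : Decidable (Pre_solve a b c d) := by
  unfold Pre_solve; infer_instance

def pvWitness_solve : Int × Int × Int × Int := (1, 2, 1, 2)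

def Spec_solve (a : Int) (b : Int) (c : Int) (d : Int) (out : String) : Prop := out = solve_alt a b c d
instance (a : Int) (b : Int) (c : Int) (d : Int) (out : String) : Decidable (Spec_solve a b c d out) := by unfold Spec_solve; infer_instance

-- ===== CLAIM (what is proved, stated in full; the proofs are below) =====
def Claim_equal_solve : Prop := ∀ (a : Int) (b : Int) (c : Int) (d : Int), Dom_solve a b c d → Pre_solve a b c d → Spec_solve a b c d (solve a b c d)

-- ===== LEMMAS AND PROOFS =====

-- "no prime factor ≤ k other than j itself": the sieve invariant predicate
abbrev NSPF (k j : Nat) : Prop := 2 ≤ j ∧ ∀ p : Nat, p < k + 1 → p.Prime → p ∣ j → p = j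

-- proper divisors of j ≥ 1 are at most half of j
lemma two_mul_le_of_dvd_ne (p j : Nat) (hj : 1 ≤ j) (hd : p ∣ j) (hne : p ≠ j) : 2 * p ≤ j := by
  obtain ⟨m, rfl⟩ := hd
  match m with
  | 0 => omega
  | 1 => omega
  | (m+2) => nlinarith

lemma nspf_one (j : Nat) : NSPF 1 j ↔ 2 ≤ j := by
  unfold NSPF
  exact ⟨fun h => h.1, fun h => ⟨h, fun p hpk hpp _ => absurd hpp.two_le (by omega)⟩⟩

lemma nspf_succ_of_not_prime {k j : Nat} (hnp : ¬ (k+1).Prime) : NSPF (k+1) j ↔ NSPF k j := by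
  unfold NSPF
  constructor
  · rintro ⟨h2, hall⟩
    exact ⟨h2, fun p hpk hpp hpd => hall p (by omega) hpp hpd⟩
  · rintro ⟨h2, hall⟩
    refine ⟨h2, fun p hpk hpp hpd => ?_⟩
    rcases Nat.lt_succ_iff_lt_or_eq.mp hpk with h | h
    · exact hall p h hpp hpd
    · exact absurd (h ▸ hpp) hnp

lemma nspf_succ_of_gt {k j : Nat} (hgt : j < k + 1) : NSPF (k+1) j ↔ NSPF k j := by
  unfold NSPF
  constructor
  · rintro ⟨h2, hall⟩
    exact ⟨h2, fun p hpk hpp hpd => hall p (by omega) hpp hpd⟩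
  · rintro ⟨h2, hall⟩
    refine ⟨h2, fun p hpk hpp hpd => ?_⟩
    rcases Nat.lt_succ_iff_lt_or_eq.mp hpk with h | h
    · exact hall p h hpp hpd
    · subst h
      have := Nat.le_of_dvd (by omega) hpd
      omega

lemma nspf_succ_mark {k j : Nat} (hp : (k+1).Prime) :
    (NSPF k j ∧ ¬ (2*(k+1) ≤ j ∧ (k+1) ∣ j)) ↔ NSPF (k+1) j := by
  unfold NSPF
  constructor
  · rintro ⟨⟨h2, hall⟩, hnm⟩
    refine ⟨h2, fun p hpk hpp hpd => ?_⟩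
    rcases Nat.lt_succ_iff_lt_or_eq.mp hpk with h | h
    · exact hall p h hpp hpd
    · by_contra hne
      have h1 := two_mul_le_of_dvd_ne p j (by omega) hpd hne
      exact hnm ⟨by omega, h ▸ hpd⟩
  · rintro ⟨h2, hall⟩
    refine ⟨⟨h2, fun p hpk hpp hpd => hall p (by omega) hpp hpd⟩, ?_⟩
    rintro ⟨hle, hdvd⟩
    have := hall (k+1) (by omega) hp hdvd
    omega

lemma nspf_of_prime {k j : Nat} (h : j.Prime) : NSPF k j := by
  refine ⟨h.two_le, fun p _ hp hpd => ?_⟩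
  rcases (Nat.Prime.eq_one_or_self_of_dvd h p hpd) with h1 | h1
  · exact absurd h1 hp.ne_one
  · exact h1

lemma prime_of_nspf {k j : Nat} (hjk : j ≤ k + 1) (h : NSPF k j) : j.Prime := by
  by_contra hnp
  obtain ⟨h2, hall⟩ := h
  have hmf : (j.minFac).Prime := Nat.minFac_prime (by omega)
  have hdvd : j.minFac ∣ j := Nat.minFac_dvd j
  have hne : j.minFac ≠ j := by
    intro he
    exact hnp (he ▸ hmf)
  have := two_mul_le_of_dvd_ne j.minFac j (by omega) hdvd hne
  have := hall j.minFac (by omega) hmf hdvd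
  omega

-- marking one nonnegative position false
lemma getD_set_false (ps : List Bool) (x : Int) (hx : 0 ≤ x) (j : Nat) :
    PySem.List.pyGetD (PySem.List.pySetD ps x false) (j : Int) false
      = (PySem.List.pyGetD ps (j : Int) false && !(x == (j : Int))) := by
  have hx' : x = ((x.toNat : Nat) : Int) := by omega
  rw [hx', PySem.List.pySetD_natCast, PySem.List.pyGetD_natCast, PySem.List.pyGetD_natCast]
  by_cases hij : x.toNat = j
  · subst hij
    simp [List.getD_eq_getElem?_getD, List.getElem?_set]
    split_ifs <;> simp
  · have : ¬ (((x.toNat : Nat) : Int) == ((j : Nat) : Int)) = true := by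
      simp; omega
    simp only [this, Bool.not_false, Bool.and_true]
    simp [List.getD_eq_getElem?_getD, hij]

-- marking a list of nonnegative positions false
lemma getD_foldl_setFalse (L : List Int) (hL : ∀ x ∈ L, 0 ≤ x) (ps : List Bool) (j : Nat) :
    PySem.List.pyGetD (L.foldl (fun p x => PySem.List.pySetD p x false) ps) (j : Int) false
      = (PySem.List.pyGetD ps (j : Int) false && !(L.contains (j : Int))) := by
  induction L generalizing ps with
  | nil => simp
  | cons x L ih =>
    have hx : (0:Int) ≤ x := hL x (by simp)
    simp only [List.foldl_cons]
    rw [ih (fun y hy => hL y (by simp [hy])), getD_set_false ps x hx j]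
    simp only [List.contains_cons, Bool.not_or, Bool.and_assoc]
    rw [BEq.comm (a := x) (b := ((j:Nat):Int))]

-- characterisation of the inner while-loop marking
lemma sieve_step (MAX i : Int) (hi : 2 ≤ i) (ps : List Bool) (j : Nat) :
    PySem.List.pyGetD ((PySem.List.pyRange (i + i) (MAX + 1) i).foldl
        (fun ps2 x => PySem.List.pySetD ps2 x false) ps) (j : Int) false
      = (PySem.List.pyGetD ps (j : Int) false &&
          !(decide (i + i ≤ (j:Int) ∧ (j:Int) < MAX + 1 ∧ i ∣ (j:Int)))) := by
  have hipos : (0:Int) < i := by omega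
  have hL : ∀ x ∈ PySem.List.pyRange (i + i) (MAX + 1) i, (0:Int) ≤ x := by
    intro x hx
    rw [PySem.List.mem_pyRange_iff_of_pos hipos] at hx
    omega
  rw [getD_foldl_setFalse _ hL ps j]
  have hmem : ((j:Int) ∈ PySem.List.pyRange (i + i) (MAX + 1) i) ↔
      (i + i ≤ (j:Int) ∧ (j:Int) < MAX + 1 ∧ i ∣ (j:Int)) := by
    rw [PySem.List.mem_pyRange_iff_of_pos hipos]
    have h2i : i ∣ (i + i) := ⟨2, by ring⟩
    constructor
    · rintro ⟨h1, h2, h3⟩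
      refine ⟨h1, h2, ?_⟩
      have := dvd_add h3 h2i
      simpa using this
    · rintro ⟨h1, h2, h3⟩
      exact ⟨h1, h2, dvd_sub h3 h2i⟩
  have hc : (PySem.List.pyRange (i + i) (MAX + 1) i).contains (j:Int)
      = decide (i + i ≤ (j:Int) ∧ (j:Int) < MAX + 1 ∧ i ∣ (j:Int)) := by
    simp [hmem]
  rw [hc]

-- the sieve invariant
lemma sieve_inv (MAX : Int) (hM : 1 ≤ MAX) (k : Int) (hk : 1 ≤ k) (j : Nat) :
    PySem.List.pyGetD
      ((PySem.List.pyRange 2 (k + 1) 1).foldl (fun ps i =>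
        if !(PySem.List.pyGetD ps i false) then ps
        else (PySem.List.pyRange (i + i) (MAX + 1) i).foldl
               (fun ps2 x => PySem.List.pySetD ps2 x false) ps)
        (PySem.List.pySetD (PySem.List.pySetD (PySem.List.pyRepeat [true] (MAX + 1)) 0 false) 1 false))
      (j : Int) false
    = decide (j < (MAX + 1).toNat ∧ NSPF k.toNat j) := by
  induction k, hk using Int.le_induction generalizing j with
  | base =>
    rw [PySem.List.pyRange_one_eq_nil (by omega)]
    simp only [List.foldl_nil]
    rw [getD_set_false _ 1 (by omega) j, getD_set_false _ 0 (by omega) j]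
    rw [PySem.List.pyRepeat_singleton, PySem.List.pyGetD_natCast]
    have hrep : (List.replicate (MAX + 1).toNat true).getD j false = decide (j < (MAX + 1).toNat) := by
      by_cases hj : j < (MAX + 1).toNat
      · simp [List.getD_eq_getElem?_getD, hj]
      · simp [List.getD_eq_getElem?_getD, hj]
    rw [hrep, show (1:Int).toNat = 1 from rfl]
    by_cases hj : j < (MAX + 1).toNat <;> by_cases h2 : 2 ≤ j <;>
      simp [hj, h2, nspf_one] <;> omega
  | succ k hk ih =>
    rw [show k + 1 + 1 = (k + 1) + 1 by ring,
        PySem.List.pyRange_one_succ_right (by omega : (2:Int) ≤ k + 1), List.foldl_append]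
    simp only [List.foldl_cons, List.foldl_nil]
    generalize hP : (List.foldl (fun ps i =>
        if (!PySem.List.pyGetD ps i false) = true then ps
        else List.foldl (fun ps2 x => PySem.List.pySetD ps2 x false) ps (PySem.List.pyRange (i + i) (MAX + 1) i))
      (PySem.List.pySetD (PySem.List.pySetD (PySem.List.pyRepeat [true] (MAX + 1)) 0 false) 1 false)
      (PySem.List.pyRange 2 (k + 1) 1)) = P
    rw [hP] at ih
    have htk : (k + 1 : Int).toNat = k.toNat + 1 := by omega
    have hik : (k + 1 : Int) = ((k.toNat + 1 : Nat) : Int) := by omega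
    have hcond : PySem.List.pyGetD P (k + 1) false
        = decide (k.toNat + 1 < (MAX + 1).toNat ∧ NSPF k.toNat (k.toNat + 1)) := by
      rw [hik]
      exact ih (k.toNat + 1)
    rw [hcond]
    by_cases hc : k.toNat + 1 < (MAX + 1).toNat ∧ NSPF k.toNat (k.toNat + 1)
    · -- primes[i] is True: i = k+1 is prime; the inner marking loop runs
      have hprime : (k.toNat + 1).Prime := prime_of_nspf (by omega) hc.2
      rw [decide_eq_true hc]
      simp only [Bool.not_true, Bool.false_eq_true, if_false]
      rw [sieve_step MAX (k + 1) (by omega), ih j, htk]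
      rw [← decide_not, ← Bool.decide_and, decide_eq_decide]
      have hdvd : ((k + 1 : Int) ∣ (j : Int)) ↔ ((k.toNat + 1) ∣ j) := by
        rw [hik]
        exact Int.natCast_dvd_natCast
      constructor
      · rintro ⟨⟨hjN, hns⟩, hnm⟩
        refine ⟨hjN, (nspf_succ_mark hprime).mp ⟨hns, ?_⟩⟩
        rintro ⟨hle, hd⟩
        exact hnm ⟨by omega, by omega, hdvd.mpr hd⟩
      · rintro ⟨hjN, hns⟩
        have h' := (nspf_succ_mark hprime).mpr hns
        refine ⟨⟨hjN, h'.1⟩, ?_⟩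
        rintro ⟨hle, hlt, hd⟩
        exact h'.2 ⟨by omega, hdvd.mp hd⟩
    · -- primes[i] is False: i = k+1 is skipped
      rw [decide_eq_false hc]
      simp only [Bool.not_false]
      simp only [if_true]
      rw [ih j, htk, decide_eq_decide]
      rcases Decidable.not_and_iff_or_not.mp hc with hbig | hnn
      · constructor
        · rintro ⟨hjN, hns⟩
          exact ⟨hjN, (nspf_succ_of_gt (by omega)).mpr hns⟩
        · rintro ⟨hjN, hns⟩
          exact ⟨hjN, (nspf_succ_of_gt (by omega)).mp hns⟩
      · have hnp : ¬ (k.toNat + 1).Prime := fun hp => hnn (nspf_of_prime hp)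
        constructor
        · rintro ⟨hjN, hns⟩
          exact ⟨hjN, (nspf_succ_of_not_prime hnp).mpr hns⟩
        · rintro ⟨hjN, hns⟩
          exact ⟨hjN, (nspf_succ_of_not_prime hnp).mp hns⟩

lemma sieve_final (MAX : Int) (hM : 1 ≤ MAX) (j : Nat) (hj : (j : Int) ≤ MAX) :
    PySem.List.pyGetD
      ((PySem.List.pyRange 2 (MAX + 1) 1).foldl (fun ps i =>
        if !(PySem.List.pyGetD ps i false) then ps
        else (PySem.List.pyRange (i + i) (MAX + 1) i).foldl
               (fun ps2 x => PySem.List.pySetD ps2 x false) ps)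
        (PySem.List.pySetD (PySem.List.pySetD (PySem.List.pyRepeat [true] (MAX + 1)) 0 false) 1 false))
      (j : Int) false
    = decide (j.Prime) := by
  rw [sieve_inv MAX hM MAX hM j, decide_eq_decide]
  constructor
  · rintro ⟨hjN, hns⟩
    exact prime_of_nspf (by omega) hns
  · intro hp
    refine ⟨by omega, nspf_of_prime hp⟩

-- trial division: characterisation of isPrimeAux
lemma isPrimeAux_spec (n dv : Int) (hn : 0 ≤ n) (hd : 2 ≤ dv) :
    isPrimeAux n dv = true ↔ ∀ e : Int, dv ≤ e → e * e ≤ n → ¬ (e ∣ n) := by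
  rw [isPrimeAux]
  split_ifs with h1 hmod
  · -- dv divides n: not prime, and dv itself is a witness
    have hdvd : dv ∣ n := (PySem.Int.mod_eq_zero_iff_dvd n dv).mp (by simpa using hmod)
    simp only [false_iff]
    intro hall
    exact hall dv le_rfl h1 hdvd
  · -- dv does not divide n: recurse on dv+1
    have hndvd : ¬ dv ∣ n := by
      intro hdvd
      exact hmod (by simp [(PySem.Int.mod_eq_zero_iff_dvd n dv).mpr hdvd])
    rw [isPrimeAux_spec n (dv + 1) hn (by omega)]
    constructor
    · intro hall e he hee
      rcases eq_or_lt_of_le he with rfl | hlt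
      · exact fun hd' => hndvd hd'
      · exact hall e (by omega) hee
    · intro hall e he hee
      exact hall e (by omega) hee
  · -- dv*dv > n: no candidate divisor remains
    constructor
    · intro _ e he hee
      have : dv * dv ≤ e * e := mul_le_mul he he (by omega) (by omega)
      omega
    · intro _
      rfl
termination_by (n + 1 - dv).toNat
decreasing_by
  have : dv * 1 ≤ dv * dv := by
    apply mul_le_mul_of_nonneg_left _ (by omega : (0:Int) ≤ dv)
    omega
  omega

lemma isPrime_spec (n : Int) (hn : 0 ≤ n) : isPrime n = decide (n.toNat.Prime) := by
  unfold isPrime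
  by_cases h2 : n < 2
  · rw [if_pos h2]
    have : n.toNat = 0 ∨ n.toNat = 1 := by omega
    rcases this with h | h <;> simp [h, Nat.not_prime_zero, Nat.not_prime_one]
  · rw [if_neg h2]
    have hspec := isPrimeAux_spec n 2 hn le_rfl
    by_cases hp : n.toNat.Prime
    · rw [decide_eq_true hp]
      apply hspec.mpr
      intro e he hee hdvd
      have hall := (Nat.prime_def_le_sqrt.mp hp).2
      have hme : ((e.toNat : Nat) : Int) = e := by omega
      have hmm : e.toNat * e.toNat ≤ n.toNat := by
        have h1 : ((e.toNat * e.toNat : Nat) : Int) = e * e := by push_cast; rw [hme]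
        omega
      refine hall e.toNat (by omega) (Nat.le_sqrt.mpr hmm) ?_
      have : ((e.toNat : Nat) : Int) ∣ ((n.toNat : Nat) : Int) := by
        rw [hme, show ((n.toNat : Nat) : Int) = n from by omega]
        exact hdvd
      exact_mod_cast this
    · rw [decide_eq_false hp]
      by_contra hne
      have htrue : isPrimeAux n 2 = true := by
        cases h : isPrimeAux n 2
        · exact absurd h hne
        · rfl
      have hall := hspec.mp htrue
      apply hp
      rw [Nat.prime_def_le_sqrt]
      refine ⟨by omega, fun m hm hms hmd => ?_⟩
      have hmm : m * m ≤ n.toNat := Nat.le_sqrt.mp hms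
      refine hall (m : Int) (by omega) ?_ ?_
      · have : ((m * m : Nat) : Int) ≤ ((n.toNat : Nat) : Int) := by exact_mod_cast hmm
        push_cast at this
        omega
      · have : ((m : Nat) : Int) ∣ ((n.toNat : Nat) : Int) := by exact_mod_cast hmd
        rwa [show ((n.toNat : Nat) : Int) = n from by omega] at this

-- running max of consecutive differences
def diffRun (prev : Int) (l : List Int) (m : Int) : Int :=
  match l with
  | [] => m
  | y :: t => diffRun y t (max m (y - prev))

lemma rangeFold_eq_diffRun (T : List Int) : ∀ (x m : Int),
    (List.range T.length).foldl (fun m k => max m (T.getD k 0 - (x :: T).getD k 0)) m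
      = diffRun x T m := by
  induction T with
  | nil =>
    intro x m
    simp [diffRun]
  | cons y T ih =>
    intro x m
    rw [List.length_cons, List.range_succ_eq_map, List.foldl_cons, List.foldl_map]
    simp only [Nat.succ_eq_add_one, List.getD_cons_zero, List.getD_cons_succ]
    rw [show diffRun x (y :: T) m = diffRun y T (max m (y - x)) from rfl]
    exact ih y (max m (y - x))

lemma idxFold_eq_diffRun (x : Int) (T : List Int) (m : Int) :
    (PySem.List.pyRange 1 (PySem.List.len (x :: T)) 1).foldl (fun m i =>
        max m (PySem.List.pyGetD (x :: T) i 0 - PySem.List.pyGetD (x :: T) (i - 1) 0)) m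
      = diffRun x T m := by
  rw [PySem.List.pyRange_one, List.foldl_map]
  have hlen : (PySem.List.len (x :: T) - 1).toNat = T.length := by
    simp [PySem.List.len_eq]
  rw [hlen]
  have hcong : (List.range T.length).foldl (fun (m : Int) (k : Nat) =>
        max m (PySem.List.pyGetD (x :: T) (1 + (k : Int)) 0
          - PySem.List.pyGetD (x :: T) (1 + (k : Int) - 1) 0)) m
      = (List.range T.length).foldl (fun m k => max m (T.getD k 0 - (x :: T).getD k 0)) m := by
    apply PySem.List.foldl_congr_mem
    intro acc k _
    have h1 : (1 + (k : Int)) = ((k + 1 : Nat) : Int) := by push_cast; ring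
    have h2 : (1 + (k : Int) - 1) = ((k : Nat) : Int) := by ring
    rw [h2, h1, PySem.List.pyGetD_natCast, PySem.List.pyGetD_natCast, List.getD_cons_succ]
  rw [hcong, rangeFold_eq_diffRun]

lemma diffRun_append (S : List Int) (x y m : Int) :
    diffRun x (S ++ [y]) m
      = (fun s : Int × Int => max s.2 (y - s.1))
          (S.foldl (fun (s : Int × Int) i => (i, max s.2 (i - s.1))) (x, m)) := by
  induction S generalizing x m with
  | nil => simp [diffRun]
  | cons z S ih => simp [diffRun, ih]

lemma filter_sieve_eq (MIN MAX : Int) (hM : 1 ≤ MAX) (hMIN : 0 ≤ MIN) :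
    (PySem.List.pyRange MIN (MAX + 1) 1).filter (fun i => PySem.List.pyGetD
      ((PySem.List.pyRange 2 (MAX + 1) 1).foldl (fun ps i =>
        if !(PySem.List.pyGetD ps i false) then ps
        else (PySem.List.pyRange (i + i) (MAX + 1) i).foldl
               (fun ps2 x => PySem.List.pySetD ps2 x false) ps)
        (PySem.List.pySetD (PySem.List.pySetD (PySem.List.pyRepeat [true] (MAX + 1)) 0 false) 1 false))
      i false)
    = (PySem.List.pyRange MIN (MAX + 1) 1).filter (fun i => isPrime i) := by
  apply List.filter_congr
  intro i hi
  rw [PySem.List.mem_pyRange_one] at hi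
  have hi' : i = ((i.toNat : Nat) : Int) := by omega
  rw [hi', sieve_final MAX hM i.toNat (by omega), isPrime_spec _ (by omega)]
  have hmx : max i 0 = i := by omega
  simp [hmx]

-- ===== VERDICT (by name: the statement is the Claim_ definition above) =====
theorem solve_spec : Claim_equal_solve := by
  intro a b c d _ hpre
  obtain ⟨hM, hMIN⟩ := hpre
  unfold Spec_solve
  simp only [solve, solve_alt]
  rw [PySem.List.foldl_append_if_eq_filter, List.append_assoc, List.singleton_append,
      idxFold_eq_diffRun, diffRun_append,
      PySem.List.foldl_if_eq_foldl_filter, filter_sieve_eq (a + c) (b + d) hM hMIN]
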